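-- pv_equiv track=rewrite | github.com/daniel-reich/ubiquitous-fiesta | zp64GNJQpZyGpYWL8_11.py | score_it
-- ===== SOURCE A (Python) =====
-- def score_it(s):
--     s = ''.join([c for c in s if c in "()0123456789"])
--     s = s.replace('(', ' ( ').replace(')', ' ) ').split()
--     depth = 0
--     score = 0
--     for el in s:
--         if el == '(':
--             depth += 1
--         elif el == ')':
--             depth -= 1
--         else:
--             score += depth * int(el)
--     return score
-- ===== SOURCE B (Python) =====
-- def score_it(s):
--     depth = 0
--     score = 0
--     cur = ''
--     for c in s:
--         if c == '(':
--             if cur: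
--                 score += depth * int(cur)
--                 cur = ''
--             depth += 1
--         elif c == ')':
--             if cur:
--                 score += depth * int(cur)
--                 cur = ''
--             depth -= 1
--         elif '0' <= c <= '9':
--             cur += c
--     if cur:
--         score += depth * int(cur)
--     return score
-- ===== Notes on version B (the rewrite author's own statement) =====
-- stated objective: alternative
-- what changed: Replaces A's three-pass pipeline (filter/join, two replace passes, whitespace split, then a token loop) by a single character scan that maintains depth, score and a pending digit buffer flushed at parens and at the end; it trades A's C-level string passes for one pure-Python pass with no intermediate strings.
import Mathlib
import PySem

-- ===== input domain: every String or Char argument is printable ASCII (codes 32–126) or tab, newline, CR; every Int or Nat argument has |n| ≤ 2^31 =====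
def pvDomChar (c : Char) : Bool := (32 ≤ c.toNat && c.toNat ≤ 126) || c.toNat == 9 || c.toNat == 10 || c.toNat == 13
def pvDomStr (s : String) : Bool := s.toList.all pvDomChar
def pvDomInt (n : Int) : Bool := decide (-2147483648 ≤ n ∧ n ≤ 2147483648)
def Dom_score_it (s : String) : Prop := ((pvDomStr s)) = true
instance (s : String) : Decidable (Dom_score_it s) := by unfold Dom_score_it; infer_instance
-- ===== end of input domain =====

-- B replaces A's filter/replace/split tokenization by one single-pass character scan with a digit buffer (alternative decomposition; no intermediate strings).

-- ===== PORT A =====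
-- `c in "()0123456789"` for a single char c is char membership
def pvAllowed (c : Char) : Bool := ("()0123456789".toList).contains c

-- loop body over tokens; int(el) never raises: every non-paren token is a nonempty digit run, so getD 0 is unreachable
def pvStepA (st : Int × Int) (el : String) : Int × Int :=
  if el = "(" then (st.1 + 1, st.2)
  else if el = ")" then (st.1 - 1, st.2)
  else (st.1, st.2 + st.1 * (PySem.Int.ofStr? el).getD 0)

def score_it (s : String) : Int :=
  let s1 := String.ofList (s.toList.filter pvAllowed)
  let s2 := PySem.Str.replace (PySem.Str.replace s1 "(" " ( ") ")" " ) "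
  ((PySem.Str.split₀ s2).foldl pvStepA ((0 : Int), (0 : Int))).2

-- ===== PORT B =====
-- int(cur) never raises at a flush (cur is a nonempty digit run), so getD 0 is unreachable
def pvFlush (d sc : Int) (cur : List Char) : Int :=
  if cur = [] then sc else sc + d * (PySem.Int.ofChars? cur).getD 0

def pvStepB (st : Int × Int × List Char) (c : Char) : Int × Int × List Char :=
  if c = '(' then (st.1 + 1, pvFlush st.1 st.2.1 st.2.2, [])
  else if c = ')' then (st.1 - 1, pvFlush st.1 st.2.1 st.2.2, [])
  else if '0' ≤ c ∧ c ≤ '9' then (st.1, st.2.1, st.2.2 ++ [c])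
  else st

def score_it_alt (s : String) : Int :=
  let st := s.toList.foldl pvStepB ((0 : Int), (0 : Int), ([] : List Char))
  pvFlush st.1 st.2.1 st.2.2

-- ===== PRECONDITION & SPEC =====
def Spec_score_it (s : String) (out : Int) : Prop := out = score_it_alt s
instance (s : String) (out : Int) : Decidable (Spec_score_it s out) := by unfold Spec_score_it; infer_instance

-- ===== CLAIM (what is proved, stated in full; the proofs are below) =====
def Claim_equal_score_it : Prop := ∀ (s : String), Dom_score_it s → Spec_score_it s (score_it s)

-- ===== LEMMAS AND PROOFS =====

-- A's token list, folded on the char-list side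
def pvTokStep (st : Int × Int) (tok : List Char) : Int × Int :=
  if tok = ['('] then (st.1 + 1, st.2)
  else if tok = [')'] then (st.1 - 1, st.2)
  else (st.1, st.2 + st.1 * (PySem.Int.ofChars? tok).getD 0)

-- the combined effect of A's two replace passes on one char
def pvExpand (c : Char) : List Char :=
  if c = '(' then [' ', '(', ' '] else if c = ')' then [' ', ')', ' '] else [c]

lemma pv_rep_go (o : Char) (new : List Char) :
    ∀ (l acc : List Char) (fuel : Nat), l.length ≤ fuel →
      PySem.Chars.replace.go [o] new fuel l acc
        = acc.reverse ++ l.flatMap (fun c => if c = o then new else [c]) := by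
  intro l
  induction l with
  | nil => intro acc fuel _; cases fuel <;> simp [PySem.Chars.replace.go]
  | cons c t ih =>
    intro acc fuel hf
    cases fuel with
    | zero => simp at hf
    | succ f =>
      by_cases hc : c = o
      · subst hc
        have hp : List.isPrefixOf [c] (c :: t) = true := by simp [List.isPrefixOf]
        have hgo : PySem.Chars.replace.go [c] new (f + 1) (c :: t) acc
            = PySem.Chars.replace.go [c] new f t (new.reverse ++ acc) := by
          simp [PySem.Chars.replace.go, hp]
        rw [hgo, ih (new.reverse ++ acc) f (by simpa using hf)]
        simp
      · have hp : List.isPrefixOf [o] (c :: t) = false := by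
          simp [List.isPrefixOf]
          intro h; exact absurd h.symm hc
        have hgo : PySem.Chars.replace.go [o] new (f + 1) (c :: t) acc
            = PySem.Chars.replace.go [o] new f t (c :: acc) := by
          simp [PySem.Chars.replace.go, hp]
        rw [hgo, ih (c :: acc) f (by simpa using hf)]
        simp [hc]

lemma pv_rep_single (l : List Char) (o : Char) (new : List Char) :
    PySem.Chars.replace l [o] new = l.flatMap (fun c => if c = o then new else [c]) := by
  simp [PySem.Chars.replace]
  simpa using pv_rep_go o new l [] l.length (le_refl _)

lemma pv_go_acc :
    ∀ (l cur : List Char) (acc : List (List Char)),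
      PySem.Chars.split₀.go l cur acc = acc.reverse ++ PySem.Chars.split₀.go l cur [] := by
  intro l
  induction l with
  | nil =>
    intro cur acc
    by_cases h : cur.isEmpty <;> simp [PySem.Chars.split₀.go, h]
  | cons c t ih =>
    intro cur acc
    by_cases hs : PySem.Chars.isspace c
    · by_cases h : cur.isEmpty
      · simp only [PySem.Chars.split₀.go, hs, h, if_true]
        exact ih [] acc
      · simp only [PySem.Chars.split₀.go, hs, h, if_true, Bool.false_eq_true, if_false]
        rw [ih [] (cur.reverse :: acc), ih [] [cur.reverse]]
        simp
    · simp only [PySem.Chars.split₀.go, hs, Bool.false_eq_true, if_false]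
      exact ih (c :: cur) acc

lemma pv_go_nil (cur : List Char) (acc : List (List Char)) :
    PySem.Chars.split₀.go [] cur acc
      = if cur.isEmpty then acc.reverse else (cur.reverse :: acc).reverse := by
  by_cases h : cur.isEmpty <;> simp [PySem.Chars.split₀.go, h]

lemma pv_go_space (l cur : List Char) (acc : List (List Char)) :
    PySem.Chars.split₀.go (' ' :: l) cur acc
      = if cur.isEmpty then PySem.Chars.split₀.go l [] acc
        else PySem.Chars.split₀.go l [] (cur.reverse :: acc) := by
  by_cases h : cur.isEmpty <;>
    simp only [PySem.Chars.split₀.go, show PySem.Chars.isspace ' ' = true from rfl, h, if_true,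
      Bool.false_eq_true, if_false]

lemma pv_go_nonspace (c : Char) (hc : PySem.Chars.isspace c = false) (l cur : List Char)
    (acc : List (List Char)) :
    PySem.Chars.split₀.go (c :: l) cur acc = PySem.Chars.split₀.go l (c :: cur) acc := by
  simp only [PySem.Chars.split₀.go, hc, Bool.false_eq_true, if_false]

-- the three chars A's replace passes insert around a paren, tokenized
lemma pv_go_paren (b : Char) (hb : PySem.Chars.isspace b = false) (X rcur : List Char) :
    PySem.Chars.split₀.go (' ' :: b :: ' ' :: X) rcur []
      = (if rcur.isEmpty then [] else [rcur.reverse]) ++ [b] :: PySem.Chars.split₀.go X [] [] := by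
  rw [pv_go_space]
  by_cases h : rcur.isEmpty
  · rw [if_pos h, if_pos h, pv_go_nonspace b hb, pv_go_space]
    simp only [List.isEmpty_cons, Bool.false_eq_true, if_false, List.reverse_cons,
      List.reverse_nil, List.nil_append]
    rw [pv_go_acc X [] [[b]]]
    simp
  · rw [if_neg h, if_neg h, pv_go_nonspace b hb, pv_go_space]
    simp only [List.isEmpty_cons, Bool.false_eq_true, if_false, List.reverse_cons,
      List.reverse_nil, List.nil_append]
    rw [pv_go_acc X [] ([b] :: [rcur.reverse])]
    simp

lemma pv_digit_enum (c : Char) :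
    ('0' ≤ c ∧ c ≤ '9') ↔ c ∈ ['0','1','2','3','4','5','6','7','8','9'] := by
  have hv : ∀ d : Char, c = d ↔ c.toNat = d.toNat := by
    intro d
    constructor
    · rintro rfl; rfl
    · intro h; exact Char.ext (UInt32.toNat_inj.mp h)
  simp only [List.mem_cons, List.not_mem_nil, or_false, hv, Char.le_def]
  show (48 ≤ c.toNat ∧ c.toNat ≤ 57) ↔ _
  simp only [show ('0').toNat = 48 from rfl, show ('1').toNat = 49 from rfl,
    show ('2').toNat = 50 from rfl, show ('3').toNat = 51 from rfl,
    show ('4').toNat = 52 from rfl, show ('5').toNat = 53 from rfl,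
    show ('6').toNat = 54 from rfl, show ('7').toNat = 55 from rfl,
    show ('8').toNat = 56 from rfl, show ('9').toNat = 57 from rfl]
  omega

lemma pv_allowed_mem (c : Char) :
    pvAllowed c = true ↔ c ∈ ['(',')','0','1','2','3','4','5','6','7','8','9'] := by
  simp [pvAllowed, show "()0123456789".toList = ['(',')','0','1','2','3','4','5','6','7','8','9'] from rfl]

lemma pv_allowed_cases (c : Char) (h : pvAllowed c = true) :
    c = '(' ∨ c = ')' ∨
      (c ≠ '(' ∧ c ≠ ')' ∧ ('0' ≤ c ∧ c ≤ '9') ∧ PySem.Chars.isspace c = false) := by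
  rw [pv_allowed_mem] at h
  fin_cases h
  · exact Or.inl rfl
  · exact Or.inr (Or.inl rfl)
  all_goals exact Or.inr (Or.inr (by refine ⟨by decide, by decide, by decide, by decide⟩))

lemma pv_not_allowed (c : Char) (h : ¬ pvAllowed c = true) :
    c ≠ '(' ∧ c ≠ ')' ∧ ¬ ('0' ≤ c ∧ c ≤ '9') := by
  refine ⟨?_, ?_, ?_⟩
  · rintro rfl; exact h (by decide)
  · rintro rfl; exact h (by decide)
  · intro hd
    rw [pv_digit_enum] at hd
    refine h ((pv_allowed_mem c).mpr ?_)
    simp only [List.mem_cons] at hd ⊢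
    tauto

lemma pv_filterB :
    ∀ (l : List Char) (st : Int × Int × List Char),
      List.foldl pvStepB st l = List.foldl pvStepB st (l.filter pvAllowed) := by
  intro l
  induction l with
  | nil => intro st; rfl
  | cons c t ih =>
    intro st
    by_cases h : pvAllowed c = true
    · simp only [List.filter_cons, h, if_true, List.foldl_cons]
      exact ih _
    · obtain ⟨h1, h2, h3⟩ := pv_not_allowed c h
      have hst : pvStepB st c = st := by simp [pvStepB, h1, h2, h3]
      simp only [List.filter_cons, h, Bool.false_eq_true, if_false, List.foldl_cons, hst]
      exact ih st

lemma pv_tok_of_digits (tok : List Char) (hne : tok ≠ [])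
    (hd : ∀ c ∈ tok, c ≠ '(' ∧ c ≠ ')') (st : Int × Int) :
    pvTokStep st tok = (st.1, st.2 + st.1 * (PySem.Int.ofChars? tok).getD 0) := by
  have h1 : tok ≠ ['('] := by
    rintro rfl; exact (hd '(' (by simp)).1 rfl
  have h2 : tok ≠ [')'] := by
    rintro rfl; exact (hd ')' (by simp)).2 rfl
  simp [pvTokStep, h1, h2]

lemma pv_main_go :
    ∀ (l : List Char), (∀ c ∈ l, pvAllowed c = true) →
      ∀ (rcur : List Char) (d sc : Int), (∀ c ∈ rcur, c ≠ '(' ∧ c ≠ ')') →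
        (let st := List.foldl pvStepB (d, sc, rcur.reverse) l
         pvFlush st.1 st.2.1 st.2.2)
          = (List.foldl pvTokStep (d, sc)
              (PySem.Chars.split₀.go (l.flatMap pvExpand) rcur [])).2 := by
  intro l
  induction l with
  | nil =>
    intro _ rcur d sc hr
    rw [List.flatMap_nil, pv_go_nil]
    by_cases h : rcur = []
    · subst h; simp [pvFlush]
    · have hne : rcur.isEmpty = false := by simpa [List.isEmpty_iff] using h
      have hrne : rcur.reverse ≠ [] := by simpa using h
      have hrd : ∀ c ∈ rcur.reverse, c ≠ '(' ∧ c ≠ ')' := fun c hc => hr c (by simpa using hc)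
      simp only [hne, Bool.false_eq_true, if_false, List.reverse_cons, List.reverse_nil,
        List.nil_append, List.foldl_nil, List.foldl_cons]
      rw [pv_tok_of_digits rcur.reverse hrne hrd]
      simp [pvFlush, hrne]
  | cons a t ih =>
    intro hall rcur d sc hr
    have ha := hall a (by simp)
    have ht : ∀ c ∈ t, pvAllowed c = true := fun c hc => hall c (by simp [hc])
    rcases pv_allowed_cases a ha with rfl | rfl | ⟨h1, h2, h3, h4⟩
    · -- a = '('
      have hstep : pvStepB (d, sc, rcur.reverse) '(' = (d + 1, pvFlush d sc rcur.reverse, []) := by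
        simp [pvStepB]
      rw [List.flatMap_cons, show pvExpand '(' = [' ', '(', ' '] from rfl]
      simp only [List.foldl_cons, hstep, List.cons_append, List.nil_append]
      rw [pv_go_paren '(' rfl]
      by_cases h : rcur = []
      · subst h
        simp only [List.isEmpty_nil, if_true, List.nil_append, List.foldl_cons,
          show pvTokStep (d, sc) ['('] = (d + 1, sc) from by simp [pvTokStep]]
        have := ih ht [] (d + 1) sc (by simp)
        simpa [pvFlush] using this
      · have hne : rcur.isEmpty = false := by simpa [List.isEmpty_iff] using h
        have hrne : rcur.reverse ≠ [] := by simpa using h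
        have hrd : ∀ c ∈ rcur.reverse, c ≠ '(' ∧ c ≠ ')' := fun c hc => hr c (by simpa using hc)
        simp only [hne, Bool.false_eq_true, if_false, List.cons_append, List.nil_append,
          List.foldl_cons]
        rw [pv_tok_of_digits rcur.reverse hrne hrd,
          show ∀ sc' : Int, pvTokStep (d, sc') ['('] = (d + 1, sc') from fun _ => by
            simp [pvTokStep]]
        have := ih ht [] (d + 1) (sc + d * (PySem.Int.ofChars? rcur.reverse).getD 0) (by simp)
        simpa [pvFlush, hrne] using this
    · -- a = ')'
      have hstep : pvStepB (d, sc, rcur.reverse) ')' = (d - 1, pvFlush d sc rcur.reverse, []) := by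
        simp [pvStepB]
      rw [List.flatMap_cons, show pvExpand ')' = [' ', ')', ' '] from rfl]
      simp only [List.foldl_cons, hstep, List.cons_append, List.nil_append]
      rw [pv_go_paren ')' rfl]
      by_cases h : rcur = []
      · subst h
        simp only [List.isEmpty_nil, if_true, List.nil_append, List.foldl_cons,
          show pvTokStep (d, sc) [')'] = (d - 1, sc) from by simp [pvTokStep]]
        have := ih ht [] (d - 1) sc (by simp)
        simpa [pvFlush] using this
      · have hne : rcur.isEmpty = false := by simpa [List.isEmpty_iff] using h
        have hrne : rcur.reverse ≠ [] := by simpa using h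
        have hrd : ∀ c ∈ rcur.reverse, c ≠ '(' ∧ c ≠ ')' := fun c hc => hr c (by simpa using hc)
        simp only [hne, Bool.false_eq_true, if_false, List.cons_append, List.nil_append,
          List.foldl_cons]
        rw [pv_tok_of_digits rcur.reverse hrne hrd,
          show ∀ sc' : Int, pvTokStep (d, sc') [')'] = (d - 1, sc') from fun _ => by
            simp [pvTokStep]]
        have := ih ht [] (d - 1) (sc + d * (PySem.Int.ofChars? rcur.reverse).getD 0) (by simp)
        simpa [pvFlush, hrne] using this
    · -- a is a digit
      have hstep : pvStepB (d, sc, rcur.reverse) a = (d, sc, rcur.reverse ++ [a]) := by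
        simp [pvStepB, h1, h2, h3]
      rw [List.flatMap_cons, show pvExpand a = [a] from by simp [pvExpand, h1, h2]]
      simp only [List.foldl_cons, hstep, List.cons_append, List.nil_append]
      rw [pv_go_nonspace a h4]
      have hrr : rcur.reverse ++ [a] = (a :: rcur).reverse := by simp
      rw [hrr]
      exact ih ht (a :: rcur) d sc (by
        intro c hc
        rcases List.mem_cons.mp hc with rfl | hc
        · exact ⟨h1, h2⟩
        · exact hr c hc)

lemma pv_stepA_ofList (st : Int × Int) (tok : List Char) :
    pvStepA st (String.ofList tok) = pvTokStep st tok := by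
  have h1 : (String.ofList tok = "(") ↔ tok = ['('] := by
    rw [show ("(" : String) = String.ofList ['('] from rfl, String.ofList_inj]
  have h2 : (String.ofList tok = ")") ↔ tok = [')'] := by
    rw [show (")" : String) = String.ofList [')'] from rfl, String.ofList_inj]
  simp only [pvStepA, pvTokStep, h1, h2, PySem.Int.ofStr?]
  simp

lemma pv_foldA_map (toks : List (List Char)) (st : Int × Int) :
    List.foldl pvStepA st (toks.map String.ofList) = List.foldl pvTokStep st toks := by
  induction toks generalizing st with
  | nil => rfl
  | cons tok rest ih => simp only [List.map_cons, List.foldl_cons, pv_stepA_ofList, ih]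

lemma pv_expand_eq (l : List Char) :
    PySem.Chars.replace (PySem.Chars.replace l ['('] [' ', '(', ' ']) [')'] [' ', ')', ' ']
      = l.flatMap pvExpand := by
  rw [pv_rep_single, pv_rep_single, List.flatMap_assoc]
  congr 1
  funext c
  by_cases h1 : c = '(' <;> by_cases h2 : c = ')' <;> simp [pvExpand, h1, h2]

-- ===== VERDICT (by name: the statement is the Claim_ definition above) =====
theorem score_it_spec : Claim_equal_score_it := by
  intro s _
  unfold Spec_score_it score_it score_it_alt
  have hs2 : (PySem.Str.replace
      (PySem.Str.replace (String.ofList (s.toList.filter pvAllowed)) "(" " ( ") ")" " ) ").toList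
      = (s.toList.filter pvAllowed).flatMap pvExpand := by
    simp only [PySem.Str.toList_replace, String.toList_ofList,
      show ("(" : String).toList = ['('] from rfl,
      show (" ( " : String).toList = [' ', '(', ' '] from rfl,
      show (")" : String).toList = [')'] from rfl,
      show (" ) " : String).toList = [' ', ')', ' '] from rfl]
    exact pv_expand_eq _
  rw [show PySem.Str.split₀ = fun s => (PySem.Chars.split₀ s.toList).map String.ofList from rfl]
  simp only [hs2]
  rw [pv_foldA_map]
  rw [pv_filterB s.toList ((0 : Int), (0 : Int), ([] : List Char))]
  have := pv_main_go (s.toList.filter pvAllowed) (fun c hc => (List.mem_filter.mp hc).2)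
      [] 0 0 (by simp)
  simpa [PySem.Chars.split₀] using this.symm
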